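-- pv_equiv track=rewrite | github.com/sharc-md/sharc4 | bin/setup_from_prmtop.py | bool_list_to_ranges
-- ===== SOURCE A (Python) =====
-- def bool_list_to_ranges(bool_list):
--     # Identify the indices of True values
--     indices = [i + 1 for i, value in enumerate(bool_list) if value=="qm"]
--
--     # If there are no True values, return an empty string
--     if not indices:
--         return ""
--
--     # Create ranges from the indices
--     ranges = []
--     start = indices[0]
--     end = start
--
--     for i in indices[1:]:
--         if i == end + 1:  # Consecutive value
--             end = i
--         else:  # Non-consecutive, end the current range
--             ranges.append((start, end))
--             start = end = i
--     ranges.append((start, end))  # Add the last range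
--
--     # Convert ranges into the desired string format
--     range_strings = [f"{s}~{e}" if s != e else f"{s}" for s, e in ranges]
--     return " ".join(range_strings)
-- ===== SOURCE B (Python) =====
-- def bool_list_to_ranges(bool_list):
--     # Run-skipping scan: find the start of each maximal "qm" run, scan forward
--     # to its end, emit the formatted piece directly; no indices list, no
--     # incremental start/end state.
--     parts = []
--     n = len(bool_list)
--     i = 0
--     while i < n:
--         if bool_list[i] == "qm":
--             j = i
--             while j + 1 < n and bool_list[j + 1] == "qm":
--                 j += 1
--             parts.append(f"{i + 1}" if i == j else f"{i + 1}~{j + 1}")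
--             i = j + 1
--         else:
--             i += 1
--     return " ".join(parts)
-- ===== Notes on version B (the rewrite author's own statement) =====
-- stated objective: alternative
-- what changed: Replaces A's filter-indices-then-track-start/end-run loop with a direct run-skipping scan over the list that finds each maximal 'qm' run and emits its formatted piece immediately, with no indices list and no run-state variables.
import Mathlib
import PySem

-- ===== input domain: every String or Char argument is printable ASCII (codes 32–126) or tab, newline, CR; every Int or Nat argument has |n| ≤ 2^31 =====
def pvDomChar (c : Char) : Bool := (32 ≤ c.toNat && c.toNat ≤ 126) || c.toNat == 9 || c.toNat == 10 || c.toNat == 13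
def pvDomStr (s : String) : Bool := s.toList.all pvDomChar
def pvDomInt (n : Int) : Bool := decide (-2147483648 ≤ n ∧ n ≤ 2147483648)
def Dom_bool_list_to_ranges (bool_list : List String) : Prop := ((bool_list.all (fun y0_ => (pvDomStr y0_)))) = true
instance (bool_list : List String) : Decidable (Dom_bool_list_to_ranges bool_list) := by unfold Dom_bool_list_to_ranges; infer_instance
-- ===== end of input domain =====

-- B changes A's structure (run-skipping scan instead of filter-indices + run-tracking loop); same values everywhere.

-- ===== PORT A =====
-- the loop body of A's for-loop over indices[1:]
def pvStepA (st : List (Int × Int) × Int × Int) (i : Int) : List (Int × Int) × Int × Int :=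
  if i == st.2.2 + 1 then (st.1, st.2.1, i) else (st.1 ++ [(st.2.1, st.2.2)], i, i)

-- the f-string of A's comprehension
def pvFmt (se : Int × Int) : String :=
  if se.1 != se.2 then PySem.Int.toStr se.1 ++ "~" ++ PySem.Int.toStr se.2 else PySem.Int.toStr se.1

def bool_list_to_ranges (bool_list : List String) : String :=
  let indices := ((PySem.List.enumerate bool_list).filter (fun p => p.2 == "qm")).map (fun p => p.1 + 1)
  match indices with
  | [] => ""
  | i0 :: rest =>
    let st := rest.foldl pvStepA ([], i0, i0)
    let ranges := st.1 ++ [(st.2.1, st.2.2)]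
    PySem.Str.join " " (ranges.map pvFmt)

-- ===== PORT B =====
-- inner while loop of B: advance j over the current "qm" run, return the run's
-- last 1-based index and the remaining suffix of the list
def pvRunEnd : List String → Int → Int × List String
  | [], j => (j, [])
  | v :: t, j => if v == "qm" then pvRunEnd t (j + 1) else (j, v :: t)

theorem pvRunEnd_length_le (t : List String) (j : Int) : (pvRunEnd t j).2.length ≤ t.length := by
  induction t generalizing j with
  | nil => simp [pvRunEnd]
  | cons v t ih =>
    simp only [pvRunEnd]
    split
    · exact Nat.le_trans (ih (j + 1)) (Nat.le_succ _)
    · simp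

-- outer while loop of B, k = current 1-based position
def pvAltGo : List String → Int → List String
  | [], _ => []
  | v :: t, k =>
    if v == "qm" then
      (if k == (pvRunEnd t k).1 then PySem.Int.toStr k
       else PySem.Int.toStr k ++ "~" ++ PySem.Int.toStr (pvRunEnd t k).1)
        :: pvAltGo (pvRunEnd t k).2 ((pvRunEnd t k).1 + 1)
    else pvAltGo t (k + 1)
termination_by l => l.length
decreasing_by
  · exact Nat.lt_succ_of_le (pvRunEnd_length_le t k)
  · simp

def bool_list_to_ranges_alt (bool_list : List String) : String :=
  PySem.Str.join " " (pvAltGo bool_list 1)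

-- ===== PRECONDITION & SPEC =====
def Spec_bool_list_to_ranges (bool_list : List String) (out : String) : Prop := out = bool_list_to_ranges_alt bool_list
instance (bool_list : List String) (out : String) : Decidable (Spec_bool_list_to_ranges bool_list out) := by unfold Spec_bool_list_to_ranges; infer_instance

-- ===== CLAIM (what is proved, stated in full; the proofs are below) =====
def Claim_equal_bool_list_to_ranges : Prop := ∀ (bool_list : List String), Dom_bool_list_to_ranges bool_list → Spec_bool_list_to_ranges bool_list (bool_list_to_ranges bool_list)

-- ===== LEMMAS AND PROOFS =====

-- 1-based positions of "qm" entries, starting at offset k (A's `indices`)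
def pvIdx : List String → Int → List Int
  | [], _ => []
  | v :: t, k => if v == "qm" then k :: pvIdx t (k + 1) else pvIdx t (k + 1)

-- pair-level version of pvAltGo
def pvPairs : List String → Int → List (Int × Int)
  | [], _ => []
  | v :: t, k =>
    if v == "qm" then (k, (pvRunEnd t k).1) :: pvPairs (pvRunEnd t k).2 ((pvRunEnd t k).1 + 1)
    else pvPairs t (k + 1)
termination_by l => l.length
decreasing_by
  · exact Nat.lt_succ_of_le (pvRunEnd_length_le t k)
  · simp

def pvFinish (st : List (Int × Int) × Int × Int) : List (Int × Int) := st.1 ++ [(st.2.1, st.2.2)]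

theorem pvIdx_enum (l : List String) (s : Int) :
    (((PySem.List.enumerate l s).filter (fun p => p.2 == "qm")).map (fun p => p.1 + 1)) = pvIdx l (s + 1) := by
  induction l generalizing s with
  | nil => simp [PySem.List.enumerate_nil, pvIdx]
  | cons v t ih =>
    simp only [PySem.List.enumerate_cons, List.filter_cons, pvIdx]
    by_cases h : v = "qm"
    · simp [h, ih]
    · simp [h, ih]

theorem pvAltGo_fmt (l : List String) (k : Int) : pvAltGo l k = (pvPairs l k).map pvFmt := by
  induction l, k using pvPairs.induct with
  | case1 k => rw [pvAltGo, pvPairs]; rfl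
  | case2 v t k hv ih =>
    rw [pvAltGo, pvPairs, if_pos hv, if_pos hv, List.map_cons, ih]
    congr 1
    generalize (pvRunEnd t k).1 = e
    by_cases h : k = e <;> simp [pvFmt, h]
  | case3 v t k hv ih =>
    rw [pvAltGo, pvPairs, if_neg hv, if_neg hv, ih]

theorem pvPairs_nil (l : List String) (k : Int) (h : pvIdx l k = []) : pvPairs l k = [] := by
  induction l generalizing k with
  | nil => simp [pvPairs]
  | cons v t ih =>
    simp only [pvIdx] at h
    by_cases hv : v = "qm"
    · simp [hv] at h
    · simp only [pvPairs, hv, beq_iff_eq, if_false]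
      exact ih _ (by simpa [hv] using h)

theorem pvOpenClosed (l : List String) :
    (∀ (e s : Int) (acc : List (Int × Int)),
      pvFinish (List.foldl pvStepA (acc, s, e) (pvIdx l (e + 1)))
        = acc ++ (s, (pvRunEnd l e).1) :: pvPairs (pvRunEnd l e).2 ((pvRunEnd l e).1 + 1)) ∧
    (∀ (k s e : Int) (acc : List (Int × Int)), e + 1 < k →
      pvFinish (List.foldl pvStepA (acc, s, e) (pvIdx l k))
        = acc ++ (s, e) :: pvPairs l k) := by
  induction l with
  | nil =>
    constructor
    · intro e s acc; simp [pvIdx, pvRunEnd, pvPairs, pvFinish]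
    · intro k s e acc _; simp [pvIdx, pvPairs, pvFinish]
  | cons v t ih =>
    constructor
    · intro e s acc
      by_cases hv : v = "qm"
      · simp only [pvIdx, pvRunEnd, hv, if_pos, beq_self_eq_true, List.foldl_cons]
        have hstep : pvStepA (acc, s, e) (e + 1) = (acc, s, e + 1) := by
          simp [pvStepA]
        rw [hstep]
        exact ih.1 (e + 1) s acc
      · simp only [pvIdx, pvRunEnd, hv, beq_iff_eq, if_false]
        rw [ih.2 (e + 1 + 1) s e acc (by omega)]
        simp [pvPairs, hv]
    · intro k s e acc hk
      by_cases hv : v = "qm"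
      · simp only [pvIdx, pvPairs, hv, if_pos, beq_self_eq_true, List.foldl_cons]
        have hstep : pvStepA (acc, s, e) k = (acc ++ [(s, e)], k, k) := by
          simp only [pvStepA, beq_iff_eq]
          rw [if_neg (by omega)]
        rw [hstep, ih.1 k k (acc ++ [(s, e)])]
        simp
      · simp only [pvIdx, pvPairs, hv, beq_iff_eq, if_false]
        exact ih.2 (k + 1) s e acc (by omega)

theorem pvMain (l : List String) (k i0 : Int) (rest : List Int) (h : pvIdx l k = i0 :: rest) :
    pvFinish (List.foldl pvStepA ([], i0, i0) rest) = pvPairs l k := by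
  induction l generalizing k with
  | nil => simp [pvIdx] at h
  | cons v t ih =>
    by_cases hv : v = "qm"
    · simp only [pvIdx, hv, if_pos, beq_self_eq_true, List.cons.injEq] at h
      obtain ⟨rfl, rfl⟩ := h
      simp only [pvPairs, hv, beq_self_eq_true, if_pos]
      have := (pvOpenClosed t).1 k k []
      simpa using this
    · simp only [pvIdx, hv, beq_iff_eq, if_false] at h
      simp only [pvPairs, hv, beq_iff_eq, if_false]
      exact ih (k + 1) h

-- ===== VERDICT (by name: the statement is the Claim_ definition above) =====
theorem bool_list_to_ranges_spec : Claim_equal_bool_list_to_ranges := by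
  intro l _
  unfold Spec_bool_list_to_ranges bool_list_to_ranges bool_list_to_ranges_alt
  rw [pvAltGo_fmt]
  have hidx := pvIdx_enum l 0
  norm_num at hidx
  rw [hidx]
  cases h : pvIdx l 1 with
  | nil => simp [pvPairs_nil l 1 h, PySem.Str.join]
  | cons i0 rest =>
    simp only
    rw [← pvMain l 1 i0 rest h]
    rfl
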